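-- pv_equiv track=rewrite | github.com/Andrew-Colman/git-imerge | gitimerge.py | iter_neighbors
-- ===== SOURCE A (Python) =====
-- def iter_neighbors(iterable):
--     """For an iterable (x0, x1, x2, ...) generate [(x0,x1), (x1,x2), ...]."""
--
--     i = iter(iterable)
--
--     try:
--         last = next(i)
--     except StopIteration:
--         return
--
--     for x in i:
--         yield (last, x)
--         last = x
-- ===== SOURCE B (Python) =====
-- def iter_neighbors(iterable):
--     """For an iterable (x0, x1, x2, ...) generate [(x0,x1), (x1,x2), ...].
--
--     Materializes the input once, then pairs elements by random-access index
--     instead of streaming with a running `last` accumulator.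
--     """
--     xs = list(iterable)
--     for i in range(len(xs) - 1):
--         yield (xs[i], xs[i + 1])
-- ===== Notes on version B (the rewrite author's own statement) =====
-- stated objective: alternative
-- what changed: Replaces the streaming last-accumulator scan of the iterator with a staged approach: materialize the input into a list once, then form each pair (xs[i], xs[i+1]) by random-access indexing over range(len(xs)-1).
import Mathlib
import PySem

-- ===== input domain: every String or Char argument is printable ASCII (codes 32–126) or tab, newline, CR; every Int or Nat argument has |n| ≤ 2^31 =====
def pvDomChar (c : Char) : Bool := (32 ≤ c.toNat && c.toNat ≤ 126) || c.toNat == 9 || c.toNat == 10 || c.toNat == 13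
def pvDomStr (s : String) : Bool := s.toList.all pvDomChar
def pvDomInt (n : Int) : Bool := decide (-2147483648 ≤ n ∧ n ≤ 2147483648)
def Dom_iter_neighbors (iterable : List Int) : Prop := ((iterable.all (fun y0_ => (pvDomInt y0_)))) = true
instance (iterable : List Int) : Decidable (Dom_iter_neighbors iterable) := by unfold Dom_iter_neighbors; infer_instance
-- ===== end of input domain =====

-- B stages the pairing: materialize the list once, then index pairs (xs[i], xs[i+1]) over range(len(xs)-1) instead of a streaming last-accumulator; same O(n) cost.


-- ===== PORT A =====
-- loop over the remaining iterator, carrying `last` and yielding (last, x)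
def iterNeighborsLoop (last : Int) : List Int → List (Int × Int)
  | [] => []
  | x :: rest => (last, x) :: iterNeighborsLoop x rest

def iter_neighbors (iterable : List Int) : List (Int × Int) :=
  match iterable with
  | [] => []            -- next(i) raised StopIteration: empty generator
  | first :: rest => iterNeighborsLoop first rest

-- ===== PORT B =====
-- materialize, then pair by random-access index over range(len(xs)-1);
-- xs[i] with i in range is PySem.List.pyGetD (default never used: indices are in range)
def iter_neighbors_alt (iterable : List Int) : List (Int × Int) :=
  (PySem.List.pyRange 0 ((iterable.length : Int) - 1) 1).map
    (fun i => (PySem.List.pyGetD iterable i 0, PySem.List.pyGetD iterable (i + 1) 0))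

-- ===== PRECONDITION & SPEC =====
def Spec_iter_neighbors (iterable : List Int) (out : List (Int × Int)) : Prop := out = iter_neighbors_alt iterable
instance (iterable : List Int) (out : List (Int × Int)) : Decidable (Spec_iter_neighbors iterable out) := by unfold Spec_iter_neighbors; infer_instance

-- ===== CLAIM (what is proved, stated in full; the proofs are below) =====
def Claim_equal_iter_neighbors : Prop := ∀ (iterable : List Int), Dom_iter_neighbors iterable → Spec_iter_neighbors iterable (iter_neighbors iterable)

-- ===== LEMMAS AND PROOFS =====

-- ===== VERDICT (by name: the statement is the Claim_ definition above) =====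
-- A's loop is zip with the tail
theorem loop_eq_zip (last : Int) (rest : List Int) :
    iterNeighborsLoop last rest = List.zip (last :: rest) rest := by
  induction rest generalizing last with
  | nil => rfl
  | cons x xs ih => simp [iterNeighborsLoop, List.zip, ih x]

-- B's index map is the same zip, element by element
theorem alt_eq_zip (xs : List Int) :
    iter_neighbors_alt xs = List.zip xs (xs.drop 1) := by
  unfold iter_neighbors_alt
  apply List.ext_getElem
  · simp only [List.length_map, PySem.List.length_pyRange_one, List.length_zip,
      List.length_drop]
    omega
  · intro k h1 h2
    have hk : (k : Int) < (xs.length : Int) - 1 := by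
      simp only [List.length_map, PySem.List.length_pyRange_one] at h1; omega
    rw [List.getElem_map, PySem.List.getElem_pyRange_one,
        PySem.List.pyGetD_eq_getElem xs 0 (by omega) (by omega),
        PySem.List.pyGetD_eq_getElem xs 0 (by omega) (by omega),
        List.getElem_zip]
    have ha : ((0 : Int) + (k : Int)).toNat = k := by omega
    have hb : ((0 : Int) + (k : Int) + 1).toNat = 1 + k := by omega
    simp only [ha, hb, List.getElem_drop]

theorem iter_neighbors_spec : Claim_equal_iter_neighbors := by
  intro iterable _
  unfold Spec_iter_neighbors iter_neighbors
  rw [alt_eq_zip]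
  cases iterable with
  | nil => rfl
  | cons a rest => simpa using loop_eq_zip a rest
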